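-- pv_equiv track=rewrite | github.com/khw5123/Project | Algorithm/BOJ/대회 or 인턴.py | solution
-- ===== SOURCE A (Python) =====
-- def solution(n, m, k):
--     for i in range(m, 0, -1):
--         if n >= m*2:
--             k -= n-m*2
--             break
--         else:
--             m, k = m-1, k-1
--     if k > 0:
--         m -= k//3
--         if k%3 != 0:
--             m -= 1
--     return m
-- ===== SOURCE B (Python) =====
-- def _phase1(n, m, k):
--     # closed-form result of A's countdown loop
--     if m <= 0:
--         return m, k
--     t = m - n // 2          # number of decrement steps before n >= 2*m holds
--     if t <= 0:
--         return m, k - (n - 2 * m)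
--     if t < m:
--         return m - t, k - t - (n - 2 * (m - t))
--     return 0, k - m         # loop exhausts all m iterations without breaking
--
--
-- def solution(n, m, k):
--     m, k = _phase1(n, m, k)
--     if k > 0:
--         m -= (k + 2) // 3   # k//3 plus one more when k % 3 != 0, i.e. ceil(k/3)
--     return m
-- ===== Notes on version B (the rewrite author's own statement) =====
-- stated objective: faster
-- what changed: Replaces A's O(m) countdown loop by an arithmetic closed form: the number of decrement steps until n >= 2*m is computed directly as t = m - n//2 (capped to [0, m]), and the final k//3-plus-remainder adjustment becomes a single ceiling division (k+2)//3.
import Mathlib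
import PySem

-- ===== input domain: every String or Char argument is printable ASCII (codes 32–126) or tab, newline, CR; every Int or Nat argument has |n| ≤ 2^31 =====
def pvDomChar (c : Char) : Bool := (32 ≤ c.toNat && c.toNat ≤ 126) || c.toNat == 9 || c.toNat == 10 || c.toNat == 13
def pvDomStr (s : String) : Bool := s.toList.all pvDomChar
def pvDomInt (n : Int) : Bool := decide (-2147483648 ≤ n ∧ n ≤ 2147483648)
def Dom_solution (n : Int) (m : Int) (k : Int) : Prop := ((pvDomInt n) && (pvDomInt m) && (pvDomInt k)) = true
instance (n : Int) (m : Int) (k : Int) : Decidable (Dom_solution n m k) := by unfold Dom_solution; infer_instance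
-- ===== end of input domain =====

-- B replaces A's O(m) countdown loop by a constant-time arithmetic closed form (objective: faster).


-- ===== PORT A =====
-- A's for-loop over range(m, 0, -1) with break, carried as structural recursion on the range list
def solutionLoop (n : Int) : List Int → Int → Int → Int × Int
  | [], m, k => (m, k)
  | _ :: rest, m, k =>
    if n ≥ m * 2 then (m, k - (n - m * 2))
    else solutionLoop n rest (m - 1) (k - 1)

def solution (n : Int) (m : Int) (k : Int) : Int :=
  let p := solutionLoop n (PySem.List.pyRange m 0 (-1)) m k
  let m1 := p.1
  let k1 := p.2
  if k1 > 0 then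
    let m2 := m1 - PySem.Int.floordiv k1 3
    if PySem.Int.mod k1 3 ≠ 0 then m2 - 1 else m2
  else m1

-- ===== PORT B =====
-- closed-form result of A's countdown phase (Source B's _phase1)
def phase1 (n : Int) (m : Int) (k : Int) : Int × Int :=
  if m ≤ 0 then (m, k)
  else
    let t := m - PySem.Int.floordiv n 2
    if t ≤ 0 then (m, k - (n - 2 * m))
    else if t < m then (m - t, k - t - (n - 2 * (m - t)))
    else (0, k - m)

def solution_alt (n : Int) (m : Int) (k : Int) : Int :=
  let p := phase1 n m k
  if p.2 > 0 then p.1 - PySem.Int.floordiv (p.2 + 2) 3 else p.1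

-- ===== PRECONDITION & SPEC =====
def Spec_solution (n : Int) (m : Int) (k : Int) (out : Int) : Prop := out = solution_alt n m k
instance (n : Int) (m : Int) (k : Int) (out : Int) : Decidable (Spec_solution n m k out) := by unfold Spec_solution; infer_instance

-- ===== CLAIM (what is proved, stated in full; the proofs are below) =====
def Claim_equal_solution : Prop := ∀ (n : Int) (m : Int) (k : Int), Dom_solution n m k → Spec_solution n m k (solution n m k)

-- ===== LEMMAS AND PROOFS =====

-- A's loop computes exactly the closed form phase1 (induction on a Nat bound for m).
lemma solutionLoop_eq_phase1 (n : Int) (M : Nat) :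
    ∀ (m k : Int), m ≤ (M : Int) →
      solutionLoop n (PySem.List.pyRange m 0 (-1)) m k = phase1 n m k := by
  induction M with
  | zero =>
    intro m k hm
    rw [PySem.List.pyRange_neg_one_eq_nil (by exact_mod_cast hm)]
    have h2 := PySem.Int.floordiv_eq_ediv_of_pos (a := n) (b := 2) (by norm_num)
    simp only [solutionLoop, phase1, h2]
    split_ifs <;> simp_all
  | succ M ih =>
    intro m k hm
    by_cases hpos : m ≤ 0
    · rw [PySem.List.pyRange_neg_one_eq_nil hpos]
      have h2 := PySem.Int.floordiv_eq_ediv_of_pos (a := n) (b := 2) (by norm_num)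
      simp only [solutionLoop, phase1, h2]
      split_ifs <;> simp_all
    · rw [PySem.List.pyRange_neg_one_cons (by omega)]
      have h2 := PySem.Int.floordiv_eq_ediv_of_pos (a := n) (b := 2) (by norm_num)
      have hdiv : 2 * (n / 2) ≤ n ∧ n < 2 * (n / 2) + 2 := by omega
      simp only [solutionLoop]
      split_ifs with hbr
      · -- break on the first visit: phase1's t ≤ 0 branch
        simp only [phase1, h2]
        split_ifs <;> simp only [Prod.mk.injEq, true_and] <;> omega
      · rw [ih (m - 1) (k - 1) (by omega)]
        simp only [phase1, h2]
        split_ifs <;> simp only [Prod.mk.injEq, true_and] <;> omega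

-- the final adjustment: k//3 plus one more when k%3 ≠ 0 equals ceiling division (k+2)//3
lemma tail_adjust (m k : Int) :
    (if k > 0 then
        let m2 := m - PySem.Int.floordiv k 3
        if PySem.Int.mod k 3 ≠ 0 then m2 - 1 else m2
      else m)
    = (if k > 0 then m - PySem.Int.floordiv (k + 2) 3 else m) := by
  have h1 := PySem.Int.floordiv_eq_ediv_of_pos (a := k) (b := 3) (by norm_num)
  have h2 := PySem.Int.floordiv_eq_ediv_of_pos (a := k + 2) (b := 3) (by norm_num)
  have h3 := PySem.Int.mod_eq_emod_of_pos (a := k) (b := 3) (by norm_num)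
  simp only [h1, h2, h3]
  split_ifs <;> omega

-- ===== VERDICT (by name: the statement is the Claim_ definition above) =====
theorem solution_spec : Claim_equal_solution := by
  intro n m k _
  unfold Spec_solution solution solution_alt
  rw [solutionLoop_eq_phase1 n m.toNat m k (by omega)]
  exact tail_adjust _ _
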